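-- pv_equiv track=rewrite | github.com/acedit/Python_kurs | week4'9/winter_is_coming.py | winter_is_coming
-- ===== SOURCE A (Python) =====
-- def winter_is_coming(seasons):
--     indikator=0
--     winter_is_coming=False
--
--     for season in seasons:
--         if season=="winter":
--             indikator=0
--         else:
--             indikator+=1
--     if indikator==5:
--             winter_is_coming=True
--
--     return winter_is_coming
-- ===== SOURCE B (Python) =====
-- def winter_is_coming(seasons):
--     s = list(seasons)
--     n = len(s)
--     return n >= 5 and "winter" not in s[-5:] and (n == 5 or s[-6] == "winter")
-- ===== Notes on version B (the rewrite author's own statement) =====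
-- stated objective: simpler
-- what changed: Replaces the forward accumulator-with-reset loop by direct suffix checks: length >= 5, no 'winter' in the last five entries, and either exactly five entries or 'winter' just before them.
import Mathlib
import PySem

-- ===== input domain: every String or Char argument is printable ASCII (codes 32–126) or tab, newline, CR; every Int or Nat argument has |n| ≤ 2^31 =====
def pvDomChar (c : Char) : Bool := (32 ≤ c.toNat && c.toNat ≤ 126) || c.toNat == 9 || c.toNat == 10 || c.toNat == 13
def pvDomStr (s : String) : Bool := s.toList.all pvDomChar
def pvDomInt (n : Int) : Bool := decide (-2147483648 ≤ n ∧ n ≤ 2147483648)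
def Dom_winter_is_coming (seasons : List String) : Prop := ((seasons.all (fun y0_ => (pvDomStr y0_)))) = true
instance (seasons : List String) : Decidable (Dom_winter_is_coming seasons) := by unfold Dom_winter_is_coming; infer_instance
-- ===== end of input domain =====

-- B replaces A's forward accumulator-with-reset loop by direct suffix checks (simpler decomposition); equal on all inputs.


-- ===== PORT A =====
def winter_is_coming (seasons : List String) : Bool :=
  let indikator : Int := seasons.foldl (fun ind season => if season == "winter" then 0 else ind + 1) 0
  indikator == 5

-- ===== PORT B =====
def winter_is_coming_alt (seasons : List String) : Bool :=
  let s := seasons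
  let n : Int := s.length
  decide (n ≥ 5) && !(PySem.List.slice s (some (-5)) none).contains "winter" &&
    (n == 5 || PySem.List.pyGet? s (-6) == some "winter")

-- ===== PRECONDITION & SPEC =====
def Spec_winter_is_coming (seasons : List String) (out : Bool) : Prop := out = winter_is_coming_alt seasons
instance (seasons : List String) (out : Bool) : Decidable (Spec_winter_is_coming seasons out) := by unfold Spec_winter_is_coming; infer_instance

-- ===== CLAIM (what is proved, stated in full; the proofs are below) =====
def Claim_equal_winter_is_coming : Prop := ∀ (seasons : List String), Dom_winter_is_coming seasons → Spec_winter_is_coming seasons (winter_is_coming seasons)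

-- ===== LEMMAS AND PROOFS =====

-- trailRun r = length of the maximal "winter"-free prefix of r
-- (= length of the trailing winter-free run of the original list when r is its reverse)
def trailRun : List String → Int
  | [] => 0
  | x :: xs => if x = "winter" then 0 else trailRun xs + 1

theorem trailRun_nonneg (r : List String) : 0 ≤ trailRun r := by
  induction r with
  | nil => simp [trailRun]
  | cons x xs ih => simp only [trailRun]; split <;> omega

theorem trailRun_le (r : List String) : trailRun r ≤ r.length := by
  induction r with
  | nil => simp [trailRun]
  | cons x xs ih => simp only [trailRun, List.length_cons]; split <;> push_cast <;> omega

theorem foldA (l : List String) (a : Int) :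
    l.foldl (fun ind season => if season == "winter" then 0 else ind + 1) a =
      if "winter" ∈ l then trailRun l.reverse else a + l.length := by
  induction l using List.reverseRecOn generalizing a with
  | nil => simp
  | append_singleton l x ih =>
    rw [List.foldl_append, List.foldl_cons, List.foldl_nil, ih]
    by_cases hx : x = "winter"
    · subst hx; simp [trailRun]
    · have hxx : ¬ ("winter" = x) := fun h => hx h.symm
      simp only [beq_iff_eq, hx, if_false, List.reverse_append, List.reverse_cons,
        List.reverse_nil, List.nil_append, List.cons_append, trailRun, List.mem_append,
        List.mem_singleton, hxx, or_false, List.length_append, List.length_cons, List.length_nil]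
      split <;> push_cast <;> ring

theorem trailRun_reverse_of_not_mem (l : List String) (h : "winter" ∉ l) :
    trailRun l.reverse = l.length := by
  induction l using List.reverseRecOn with
  | nil => simp [trailRun]
  | append_singleton l x ih =>
    have hx : x ≠ "winter" := by intro e; exact h (by simp [e])
    have hl : "winter" ∉ l := fun m => h (by simp [m])
    simp [trailRun, hx, ih hl]

theorem A_eq (l : List String) : winter_is_coming l = (trailRun l.reverse == 5) := by
  unfold winter_is_coming
  rw [foldA]
  split
  · rfl
  · next h => rw [trailRun_reverse_of_not_mem l h]; norm_num

theorem keyR (r : List String) :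
    ((trailRun r == 5) : Bool) =
      (decide ((r.length : Int) ≥ 5) && !(r.take 5).contains "winter" &&
        (((r.length : Int) == 5) || r[5]? == some "winter")) := by
  rcases Nat.lt_or_ge r.length 5 with h | h
  · have hL : (trailRun r == 5) = false := by
      have h1 := trailRun_le r
      simp only [beq_eq_false_iff_ne, ne_eq]
      omega
    have hR : decide ((r.length : Int) ≥ 5) = false := by
      simp only [decide_eq_false_iff_not, not_le]
      exact_mod_cast h
    rw [hL, hR]; simp
  · obtain ⟨a, b, c, d, e, rest, rfl⟩ : ∃ a b c d e rest, r = a :: b :: c :: d :: e :: rest := by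
      match r, h with
      | a :: b :: c :: d :: e :: rest, _ => exact ⟨a, b, c, d, e, rest, rfl⟩
    rcases rest with _ | ⟨x, t⟩
    · simp only [trailRun, List.length_cons, List.length_nil, List.take, List.contains_cons,
        List.contains_nil, List.getElem?_cons_succ]
      split_ifs with ha hb hc hd he <;> simp_all
      exact ⟨fun h => ha h.symm, fun h => hb h.symm, fun h => hc h.symm,
        fun h => hd h.symm, fun h => he h.symm⟩
    · have ht := trailRun_nonneg t
      simp only [trailRun, List.length_cons, List.take, List.contains_cons, List.contains_nil,
        List.getElem?_cons_succ, List.getElem?_cons_zero]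
      split_ifs with ha hb hc hd he hx <;> simp_all
      · exact ⟨by omega, fun h => ha h.symm, fun h => hb h.symm, fun h => hc h.symm,
          fun h => hd h.symm, fun h => he h.symm⟩
      · have hL : (trailRun t + 1 + 1 + 1 + 1 + 1 + 1 == (5 : Int)) = false :=
          beq_eq_false_iff_ne.mpr (by omega)
        have hlen : (((t.length : Int)) + 1 + 1 + 1 + 1 + 1 + 1 == (5 : Int)) = false :=
          beq_eq_false_iff_ne.mpr (by omega)
        have hx' : (x == "winter") = false := beq_eq_false_iff_ne.mpr hx
        rw [hL, hlen, hx']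
        simp

theorem pyGet_neg6_eq_reverse (l : List String) :
    PySem.List.pyGet? l (-6) = l.reverse[5]? := by
  rcases Nat.lt_or_ge l.length 6 with h | h
  · rw [(PySem.List.pyGet?_eq_none_iff _ _).2, List.getElem?_eq_none (by simp only [List.length_reverse]; omega)]
    simp [PySem.Raise.InRange]; omega
  · rw [PySem.List.pyGet?_neg_ofNat _ 6 (by omega) (by omega)]
    have h5 : l.length - 6 < l.reverse.reverse.length := by simp only [List.length_reverse]; omega
    calc l[l.length - 6]? = l.reverse.reverse[l.length - 6]? := by rw [List.reverse_reverse]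
      _ = l.reverse[l.reverse.length - 1 - (l.length - 6)]? := List.getElem?_reverse (by simpa using h5)
      _ = l.reverse[5]? := by congr 1; simp; omega

theorem B_eq (l : List String) : winter_is_coming_alt l = (trailRun l.reverse == 5) := by
  show (decide (((l.length : Int)) ≥ 5) && !(PySem.List.slice l (some (-5)) none).contains "winter" &&
      (((l.length : Int)) == 5 || PySem.List.pyGet? l (-6) == some "winter")) = _
  rw [keyR l.reverse]
  rw [PySem.List.slice_from_neg_ofNat l 5 (by norm_num)]
  have hd : l.reverse.take 5 = (l.drop (l.length - 5)).reverse := List.take_reverse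
  rw [pyGet_neg6_eq_reverse, hd]
  simp

-- ===== VERDICT (by name: the statement is the Claim_ definition above) =====
theorem winter_is_coming_spec : Claim_equal_winter_is_coming := by
  intro seasons _
  unfold Spec_winter_is_coming
  rw [A_eq, B_eq]
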